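-- pv_equiv track=rewrite | github.com/pypi-data/pypi-mirror-401 | packages/open-science-assistant/open_science_assistant-0.2.0a0-py3-none-any.whl/src/tools/markdown_cleaner.py | clean_markdown_headers
-- ===== SOURCE A (Python) =====
-- def clean_markdown_headers(text: str) -> str:
--     """Normalize markdown headers.
--
--     Ensures consistent spacing around headers.
--
--     Args:
--         text: Markdown text
--
--     Returns:
--         Text with normalized headers
--     """
--     lines = text.split("\n")
--     cleaned_lines = []
--
--     for i, line in enumerate(lines):
--         # Check if this line is a header
--         if line.strip().startswith("#"):
--             # Add blank line before header if not at start
--             if i > 0 and cleaned_lines and cleaned_lines[-1].strip():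
--                 cleaned_lines.append("")
--             cleaned_lines.append(line)
--             # Add blank line after header if next line is not blank
--             if i < len(lines) - 1 and lines[i + 1].strip():
--                 cleaned_lines.append("")
--         else:
--             cleaned_lines.append(line)
--
--     return "\n".join(cleaned_lines)
-- ===== SOURCE B (Python) =====
-- def clean_markdown_headers(text: str) -> str:
--     """Normalize markdown headers (single state-machine pass, no indices/lookahead)."""
--     out = []
--     prev_nonblank = False  # last emitted line had non-empty strip()
--     pending_blank = False  # a header was just emitted; may need a trailing blank
--     for line in text.split("\n"):
--         nonblank = bool(line.strip())
--         if pending_blank: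
--             if nonblank:
--                 out.append("")
--                 prev_nonblank = False
--             pending_blank = False
--         if line.strip().startswith("#"):
--             if prev_nonblank:
--                 out.append("")
--             out.append(line)
--             prev_nonblank = True
--             pending_blank = True
--         else:
--             out.append(line)
--             prev_nonblank = nonblank
--     return "\n".join(out)
-- ===== Notes on version B (the rewrite author's own statement) =====
-- stated objective: alternative
-- what changed: Replaces A's index-based loop with lookahead (lines[i+1]) and output inspection (cleaned_lines[-1].strip()) by a single forward state machine over the lines carrying two booleans (prev_nonblank, pending_blank), with no indexing at all.
import Mathlib
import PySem

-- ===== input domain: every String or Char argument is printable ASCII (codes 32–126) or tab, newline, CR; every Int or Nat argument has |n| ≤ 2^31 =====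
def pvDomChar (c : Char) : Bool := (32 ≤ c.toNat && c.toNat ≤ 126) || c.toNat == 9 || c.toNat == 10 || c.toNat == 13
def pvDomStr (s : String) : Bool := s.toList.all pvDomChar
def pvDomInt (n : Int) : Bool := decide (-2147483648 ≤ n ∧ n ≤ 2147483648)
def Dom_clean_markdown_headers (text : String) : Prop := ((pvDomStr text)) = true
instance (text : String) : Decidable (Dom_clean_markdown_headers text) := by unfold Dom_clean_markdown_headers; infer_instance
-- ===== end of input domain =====

-- B replaces A's index-based loop with lookahead and output inspection by a two-flag
-- forward state machine over the lines (objective: alternative decomposition, same cost).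


-- ===== PORT A =====
-- A's 'for i, line in enumerate(lines)' as recursion on the index i over the fixed
-- list 'lines'; 'cleaned_lines[-1]' is the last of the (checked nonempty) accumulator,
-- 'lines[i + 1]' the lookahead (guarded by i < len(lines) - 1).
def cmhLoopA (lines : List String) (i : Nat) (acc : List String) : List String :=
  if i < lines.length then
    let line := lines.getD i ""
    let acc :=
      if PySem.Str.startswith (PySem.Str.strip line) "#" then
        let acc := if 0 < i ∧ acc ≠ [] ∧ PySem.Str.strip (acc.getLastD "") ≠ "" then acc ++ [""] else acc
        let acc := acc ++ [line]
        if i < lines.length - 1 ∧ PySem.Str.strip (lines.getD (i + 1) "") ≠ "" then acc ++ [""] else acc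
      else acc ++ [line]
    cmhLoopA lines (i + 1) acc
  else acc
termination_by lines.length - i

def clean_markdown_headers (text : String) : String :=
  PySem.Str.join "\n" (cmhLoopA ((PySem.Str.split? text "\n").getD []) 0 [])

-- ===== PORT B =====
-- B's single forward pass: state (out, prev_nonblank, pending_blank), no indices;
-- the two assignments of the 'if pending_blank and nonblank' block are the two lets.
def cmhLoopB (ls : List String) (out : List String) (prev pend : Bool) : List String :=
  match ls with
  | [] => out
  | line :: rest =>
    let nonblank : Bool := PySem.Str.strip line != ""
    let out1 := if pend && nonblank then out ++ [""] else out
    let prev1 := if pend && nonblank then false else prev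
    if PySem.Str.startswith (PySem.Str.strip line) "#" then
      cmhLoopB rest ((if prev1 then out1 ++ [""] else out1) ++ [line]) true true
    else
      cmhLoopB rest (out1 ++ [line]) nonblank false

def clean_markdown_headers_alt (text : String) : String :=
  PySem.Str.join "\n" (cmhLoopB ((PySem.Str.split? text "\n").getD []) [] false false)

-- ===== PRECONDITION & SPEC =====
def Spec_clean_markdown_headers (text : String) (out : String) : Prop := out = clean_markdown_headers_alt text
instance (text : String) (out : String) : Decidable (Spec_clean_markdown_headers text out) := by unfold Spec_clean_markdown_headers; infer_instance

-- ===== CLAIM (what is proved, stated in full; the proofs are below) =====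
def Claim_equal_clean_markdown_headers : Prop := ∀ (text : String), Dom_clean_markdown_headers text → Spec_clean_markdown_headers text (clean_markdown_headers text)

-- ===== LEMMAS AND PROOFS =====

-- a stripped string that startswith "#" is nonempty
lemma strip_startswith_ne (s : String)
    (h : PySem.Str.startswith (PySem.Str.strip s) "#" = true) :
    PySem.Str.strip s ≠ "" := by
  intro he
  rw [he] at h
  simp [PySem.Str.startswith, PySem.Chars.startswith] at h

lemma append_if (X : List String) (c : Prop) [Decidable c] :
    (X ++ if c then [""] else []) = if c then X ++ [""] else X := by
  split_ifs <;> simp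

-- one-step unfolding of cmhLoopB on a cons cell
lemma cmhLoopB_cons (line : String) (rest out : List String) (prev pend : Bool) :
    cmhLoopB (line :: rest) out prev pend =
      if PySem.Str.startswith (PySem.Str.strip line) "#" then
        cmhLoopB rest
          ((if (if pend && (PySem.Str.strip line != "") then false else prev)
            then (if pend && (PySem.Str.strip line != "") then out ++ [""] else out) ++ [""]
            else (if pend && (PySem.Str.strip line != "") then out ++ [""] else out)) ++ [line]) true true
      else
        cmhLoopB rest ((if pend && (PySem.Str.strip line != "") then out ++ [""] else out) ++ [line])
          (PySem.Str.strip line != "") false := rfl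

-- B's step, specialised: pending flush fires, header line
lemma stepB_flush_header (line : String) (rest out : List String) (prev : Bool)
    (hn : (PySem.Str.strip line != "") = true)
    (hh : PySem.Str.startswith (PySem.Str.strip line) "#" = true) :
    cmhLoopB (line :: rest) out prev true = cmhLoopB rest ((out ++ [""]) ++ [line]) true true := by
  rw [cmhLoopB_cons, hn, hh]
  simp

-- B's step: no pending, header line
lemma stepB_header (line : String) (rest out : List String) (prev : Bool)
    (hh : PySem.Str.startswith (PySem.Str.strip line) "#" = true) :
    cmhLoopB (line :: rest) out prev false
      = cmhLoopB rest ((if prev then out ++ [""] else out) ++ [line]) true true := by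
  rw [cmhLoopB_cons, hh]
  simp

-- B's step: pending flush fires, non-header line
lemma stepB_flush_plain (line : String) (rest out : List String) (prev : Bool)
    (hn : (PySem.Str.strip line != "") = true)
    (hh : PySem.Str.startswith (PySem.Str.strip line) "#" = false) :
    cmhLoopB (line :: rest) out prev true
      = cmhLoopB rest ((out ++ [""]) ++ [line]) (PySem.Str.strip line != "") false := by
  rw [cmhLoopB_cons, hn, hh]
  simp

-- B's step: no flush (either no pending or a blank line), non-header line
lemma stepB_plain (line : String) (rest out : List String) (prev pend : Bool)
    (hx : (pend && (PySem.Str.strip line != "")) = false)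
    (hh : PySem.Str.startswith (PySem.Str.strip line) "#" = false) :
    cmhLoopB (line :: rest) out prev pend
      = cmhLoopB rest (out ++ [line]) (PySem.Str.strip line != "") false := by
  rw [cmhLoopB_cons, hx, hh]
  simp

-- core invariant: A's accumulator equals B's output plus the (already committed)
-- pending blank, and prev mirrors the blankness of B's last emitted line.
lemma cmhLoop_eq (lines : List String) :
    ∀ n i out (pend : Bool), i ≤ lines.length → lines.length - i = n →
    (out ≠ [] → 0 < i) →
    cmhLoopA lines i
        (out ++ (if pend = true ∧ i < lines.length ∧ PySem.Str.strip (lines.getD i "") ≠ "" then [""] else []))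
      = cmhLoopB (lines.drop i) out
          (decide (PySem.Str.strip (out.getLastD "") ≠ "")) pend := by
  intro n
  induction n with
  | zero =>
    intro i out pend hle hn hout
    have hi : i = lines.length := by omega
    subst hi
    rw [cmhLoopA]
    simp [cmhLoopB]
  | succ n ih =>
    intro i out pend hle hn hout
    have hi : i < lines.length := by omega
    have hdrop : lines.drop i = lines.getD i "" :: lines.drop (i + 1) := by
      rw [List.getD_eq_getElem _ _ hi]; exact List.drop_eq_getElem_cons hi
    have hafter :
        (i < lines.length - 1 ∧ PySem.Str.strip (lines.getD (i + 1) "") ≠ "")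
          = (True = True ∧ i + 1 < lines.length ∧ PySem.Str.strip (lines.getD (i + 1) "") ≠ "") := by
      apply propext
      constructor
      · rintro ⟨h1, h2⟩; exact ⟨rfl, by omega, h2⟩
      · rintro ⟨_, h1, h2⟩; exact ⟨by omega, h2⟩
    rw [hdrop]
    by_cases hh : PySem.Str.startswith (PySem.Str.strip (lines.getD i "")) "#" = true
    · -- header line
      have hnb : PySem.Str.strip (lines.getD i "") ≠ "" := strip_startswith_ne _ hh
      have hnbb : (PySem.Str.strip (lines.getD i "") != "") = true := by simpa using hnb
      by_cases hp : pend = true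
      · -- pending blank flushes (a header line is nonblank)
        subst hp
        rw [if_pos ⟨rfl, hi, hnb⟩, cmhLoopA, if_pos hi]
        simp only [hh, if_pos]
        have hA : ¬ (0 < i ∧ out ++ [""] ≠ [] ∧ PySem.Str.strip ((out ++ [""]).getLastD "") ≠ "") := by
          rintro ⟨-, -, hc⟩
          rw [List.getLastD_concat] at hc
          exact hc (by decide)
        rw [if_neg hA]
        simp only [hafter]
        have hrec := ih (i + 1) ((out ++ [""]) ++ [lines.getD i ""]) true (by omega) (by omega)
          (fun _ => by omega)
        rw [append_if] at hrec
        simp only [List.getLastD_concat] at hrec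
        rw [hrec, stepB_flush_header _ _ _ _ hnbb hh, decide_eq_true hnb]
      · have hp' : pend = false := by cases pend <;> simp_all
        subst hp'
        rw [if_neg (by rintro ⟨h, -⟩; cases h), List.append_nil, cmhLoopA, if_pos hi]
        simp only [hh, if_pos]
        by_cases hb : PySem.Str.strip (out.getLastD "") ≠ ""
        · have hne : out ≠ [] := by
            intro he; subst he
            exact hb (by decide)
          have hA : (0 < i ∧ out ≠ [] ∧ PySem.Str.strip (out.getLastD "") ≠ "") :=
            ⟨hout hne, hne, hb⟩
          rw [if_pos hA]
          simp only [hafter]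
          have hrec := ih (i + 1) ((out ++ [""]) ++ [lines.getD i ""]) true (by omega) (by omega)
            (fun _ => by omega)
          rw [append_if] at hrec
          simp only [List.getLastD_concat] at hrec
          rw [hrec, stepB_header _ _ _ _ hh, decide_eq_true hb, if_pos rfl, decide_eq_true hnb]
        · have hA : ¬ (0 < i ∧ out ≠ [] ∧ PySem.Str.strip (out.getLastD "") ≠ "") := by
            rintro ⟨-, -, hc⟩; exact hb hc
          rw [if_neg hA]
          simp only [hafter]
          have hrec := ih (i + 1) (out ++ [lines.getD i ""]) true (by omega) (by omega)
            (fun _ => by omega)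
          rw [append_if] at hrec
          simp only [List.getLastD_concat] at hrec
          rw [hrec, stepB_header _ _ _ _ hh, decide_eq_false hb,
            if_neg (by simp : ¬ (false = true)), decide_eq_true hnb]
    · -- non-header line
      have hh' : PySem.Str.startswith (PySem.Str.strip (lines.getD i "")) "#" = false := by
        cases hx : PySem.Str.startswith (PySem.Str.strip (lines.getD i "")) "#"
        · rfl
        · exact absurd hx hh
      by_cases hnb : PySem.Str.strip (lines.getD i "") ≠ ""
      · have hnbb : (PySem.Str.strip (lines.getD i "") != "") = true := by simpa using hnb
        by_cases hp : pend = true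
        · subst hp
          rw [if_pos ⟨rfl, hi, hnb⟩, cmhLoopA, if_pos hi]
          simp only [hh, if_neg, Bool.false_eq_true, not_false_eq_true]
          have hrec := ih (i + 1) ((out ++ [""]) ++ [lines.getD i ""]) false (by omega) (by omega)
            (fun _ => by omega)
          simp only [Bool.false_eq_true, false_and, if_false, List.append_nil,
            List.getLastD_concat] at hrec
          rw [List.append_assoc, ← List.append_assoc out, hrec,
            stepB_flush_plain _ _ _ _ hnbb hh', hnbb, decide_eq_true hnb]
        · have hp' : pend = false := by cases pend <;> simp_all
          subst hp'
          rw [if_neg (by rintro ⟨h, -⟩; cases h), List.append_nil, cmhLoopA, if_pos hi]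
          simp only [hh, if_neg, Bool.false_eq_true, not_false_eq_true]
          have hrec := ih (i + 1) (out ++ [lines.getD i ""]) false (by omega) (by omega)
            (fun _ => by omega)
          simp only [Bool.false_eq_true, false_and, if_false, List.append_nil,
            List.getLastD_concat] at hrec
          rw [hrec, stepB_plain _ _ _ _ _ (by simp) hh', hnbb, decide_eq_true hnb]
      · -- blank non-header line: no flush on either side
        have hs : PySem.Str.strip (lines.getD i "") = "" := not_not.mp hnb
        have hnbb : (PySem.Str.strip (lines.getD i "") != "") = false := by rw [hs]; decide
        rw [if_neg (by rintro ⟨-, -, hc⟩; exact hc hs), List.append_nil, cmhLoopA, if_pos hi]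
        simp only [hh, if_neg, Bool.false_eq_true, not_false_eq_true]
        have hrec := ih (i + 1) (out ++ [lines.getD i ""]) false (by omega) (by omega)
          (fun _ => by omega)
        simp only [Bool.false_eq_true, false_and, if_false, List.append_nil,
          List.getLastD_concat] at hrec
        rw [hrec, stepB_plain _ _ _ _ _ (by rw [hnbb, Bool.and_false]) hh', hnbb, hs]
        simp

-- ===== VERDICT (by name: the statement is the Claim_ definition above) =====
theorem clean_markdown_headers_spec : Claim_equal_clean_markdown_headers := by
  intro text _
  unfold Spec_clean_markdown_headers clean_markdown_headers clean_markdown_headers_alt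
  have h := cmhLoop_eq ((PySem.Str.split? text "\n").getD [])
    ((PySem.Str.split? text "\n").getD []).length 0 [] false (by omega) rfl (by simp)
  simp only [List.drop_zero, Bool.false_eq_true, false_and, if_false, List.nil_append,
    List.getLastD_nil] at h
  rw [h]
  rfl
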